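-- pv_equiv track=rewrite | github.com/mahmoudnafifi/WDYS | vis.py | mask_text
-- ===== SOURCE A (Python) =====
-- from typing import Optional, Tuple, List
--
-- def mask_text(text: str, kernel_size: Optional[int] = 3,
--               stride: Optional[int] = 1
--               ) -> Tuple[List[str], List[Tuple[int, int]]]:
--   """Generates masked text using a sliding kernel.
--
--   Args:
--     text: Input text.
--     kernel_size: Size of the sliding kernel (words).
--     stride: Stride for sliding the kernel (words).
--
--   Returns:
--     A list of masked texts and indices of masked out words in the original text.
--   """
--   words = text.split()
--   masked_texts = []
--   masked_indices = []
--
--   for i in range(0, len(words) - kernel_size + 1, stride):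
--     masked_words = [' ' * len(word) if i <= j < i + kernel_size else word for
--                     j, word in enumerate(words)]
--     masked_text = ' '.join(masked_words)
--     masked_texts.append(masked_text)
--     masked_indices.append((i, i + kernel_size))
--   return masked_texts, masked_indices
-- ===== SOURCE B (Python) =====
-- def mask_text(text, kernel_size=3, stride=1):
--   """Flat-string reimplementation: join the words once into a canonical string,
--   precompute each word's character offsets in it, and produce every masked text
--   by overwriting one contiguous character span with spaces (prefix + space run +
--   suffix of the canonical string) instead of re-joining word lists."""
--   words = text.split()
--   canonical = ' '.join(words)
--   starts = []
--   ends = []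
--   pos = 0
--   for w in words:
--     starts.append(pos)
--     ends.append(pos + len(w))
--     pos = pos + len(w) + 1
--   masked_texts = []
--   masked_indices = []
--   for i in range(0, len(words) - kernel_size + 1, stride):
--     j = i + kernel_size
--     a = starts[i]
--     b = ends[j - 1]
--     masked_texts.append(canonical[:a] + ' ' * (b - a) + canonical[b:])
--     masked_indices.append((i, j))
--   return masked_texts, masked_indices
-- ===== Notes on version B (the rewrite author's own statement) =====
-- stated objective: alternative
-- what changed: B joins the words into one canonical string once, precomputes each word's character offsets in it, and emits every masked text by overwriting a single contiguous character span with spaces (string prefix + space run + string suffix), instead of A's per-window scan over all words with an index-range conditional followed by a join.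
-- outside the precondition, e.g. on mask_text('a b', 0, 1): A returns (['a b', 'a b', 'a b'], [(0, 0), (1, 1), (2, 2)]), B raises IndexError; on mask_text('a b', -1, 9): A returns (['a b'], [(0, -1)]), B returns (['  b'], [(0, -1)])
import Mathlib
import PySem

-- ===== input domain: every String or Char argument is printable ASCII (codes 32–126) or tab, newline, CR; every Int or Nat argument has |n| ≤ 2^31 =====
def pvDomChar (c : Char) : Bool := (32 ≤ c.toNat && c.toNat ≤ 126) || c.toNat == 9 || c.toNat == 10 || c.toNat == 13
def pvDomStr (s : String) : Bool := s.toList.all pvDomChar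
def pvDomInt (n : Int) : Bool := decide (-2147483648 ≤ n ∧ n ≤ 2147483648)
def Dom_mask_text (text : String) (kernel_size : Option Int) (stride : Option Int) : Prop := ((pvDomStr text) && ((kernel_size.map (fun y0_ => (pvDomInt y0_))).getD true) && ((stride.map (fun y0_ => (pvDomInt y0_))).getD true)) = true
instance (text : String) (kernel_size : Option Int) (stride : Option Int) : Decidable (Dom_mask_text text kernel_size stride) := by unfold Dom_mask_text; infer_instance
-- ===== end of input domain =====

-- B joins the words into one canonical string once, precomputes each word's character
-- offsets in it, and builds every masked text by overwriting one contiguous character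
-- span with spaces, instead of A's per-window conditional scan over all words + join.

-- ===== PORT A =====
-- ' ' * len(word)  (exact: a string of word-many spaces)
def pySpaces (w : String) : String := String.ofList (List.replicate (PySem.Str.len w).toNat ' ')

def mask_text (text : String) (kernel_size : Option Int) (stride : Option Int) : List String × (List (Int × Int)) :=
  match kernel_size, stride with
  | some k, some s =>
    let words := PySem.Str.split₀ text
    (PySem.List.pyRange 0 ((words.length : Int) - k + 1) s).foldl
      (fun acc i =>
        let masked_words := (PySem.List.enumerate words 0).map
          (fun jw => if i ≤ jw.1 ∧ jw.1 < i + k then pySpaces jw.2 else jw.2)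
        (acc.1 ++ [PySem.Str.join " " masked_words], acc.2 ++ [(i, i + k)]))
      ([], [])
  | _, _ => ([], [])   -- Python raises TypeError on a None argument; excluded by Pre_

-- ===== PORT B =====
def mask_text_alt (text : String) (kernel_size : Option Int) (stride : Option Int) : List String × (List (Int × Int)) :=
  match kernel_size with
  | none => ([], [])   -- Python raises TypeError on a None argument; excluded by Pre_
  | some k =>
  match stride with
  | none => ([], [])   -- Python raises TypeError on a None argument; excluded by Pre_
  | some s =>
    let words := PySem.Str.split₀ text
    let canonical := PySem.Str.join " " words
    -- the offsets loop: starts.append(pos); ends.append(pos + len(w)); pos += len(w) + 1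
    let offs := words.foldl
      (fun (acc : List Int × List Int × Int) w =>
        (acc.1 ++ [acc.2.2], acc.2.1 ++ [acc.2.2 + PySem.Str.len w], acc.2.2 + PySem.Str.len w + 1))
      ([], [], 0)
    (PySem.List.pyRange 0 ((words.length : Int) - k + 1) s).foldl
      (fun acc i =>
        let j := i + k
        let a := PySem.List.pyGetD offs.1 i 0        -- starts[i]; in range inside Pre_ (IndexError excluded by Pre_)
        let b := PySem.List.pyGetD offs.2.1 (j - 1) 0 -- ends[j-1]; in range inside Pre_
        (acc.1 ++ [String.ofList ((PySem.Str.slice canonical none (some a)).toList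
                     ++ List.replicate (b - a).toNat ' '
                     ++ (PySem.Str.slice canonical (some b) none).toList)],
         acc.2 ++ [(i, j)]))
      ([], [])

-- ===== PRECONDITION & SPEC =====
-- Pre_ admits the natural sliding-window domain (kernel_size ≥ 1, stride ≥ 1) plus the cases where a
-- negative stride makes the window range empty. Excluded while A returns: kernel_size ≤ 0 with a
-- positive stride (A returns unmasked copies of the text; B's offset lookup for the empty window
-- raises IndexError), and a negative stride with a nonempty range, where the window bounds become
-- Python negative indices — a degenerate regime (unmasked texts, negative index pairs) on which the
-- two constructions legitimately differ; A also raises (TypeError/ValueError) on None args or stride 0.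
def Pre_mask_text (text : String) (kernel_size : Option Int) (stride : Option Int) : Prop :=
  kernel_size.isSome = true ∧ stride.isSome = true ∧
    ((1 ≤ kernel_size.getD 0 ∧ 1 ≤ stride.getD 0) ∨
     (stride.getD 0 ≤ -1 ∧ kernel_size.getD 0 ≤ ((PySem.Str.split₀ text).length : Int) + 1))
instance (text : String) (kernel_size : Option Int) (stride : Option Int) : Decidable (Pre_mask_text text kernel_size stride) := by unfold Pre_mask_text; infer_instance

def pvWitness_mask_text : String × Option Int × Option Int := ("the quick brown fox", some 2, some 1)

def Spec_mask_text (text : String) (kernel_size : Option Int) (stride : Option Int) (out : List String × (List (Int × Int))) : Prop := out = mask_text_alt text kernel_size stride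
instance (text : String) (kernel_size : Option Int) (stride : Option Int) (out : List String × (List (Int × Int))) : Decidable (Spec_mask_text text kernel_size stride out) := by unfold Spec_mask_text; infer_instance

-- ===== CLAIM (what is proved, stated in full; the proofs are below) =====
def Claim_equal_mask_text : Prop := ∀ (text : String) (kernel_size : Option Int) (stride : Option Int), Dom_mask_text text kernel_size stride → Pre_mask_text text kernel_size stride → Spec_mask_text text kernel_size stride (mask_text text kernel_size stride)

-- ===== LEMMAS AND PROOFS =====

-- ---- A-side: the per-word conditional pass equals a three-part splice of the word list ----

theorem mask_enum_splice {α β : Type} (f : α → β) (g : α → β) (ws : List α) (a m : Nat)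
    (h : a + m ≤ ws.length) (t : Int) :
    (PySem.List.enumerate ws t).map
        (fun jw => if t + (a : Int) ≤ jw.1 ∧ jw.1 < t + (a : Int) + (m : Int) then f jw.2 else g jw.2)
      = (ws.take a).map g ++ ((ws.drop a).take m).map f ++ (ws.drop (a + m)).map g := by
  have hsplit : ws = ws.take a ++ ((ws.drop a).take m ++ ws.drop (a + m)) := by
    rw [← List.drop_drop, List.take_append_drop, List.take_append_drop]
  have hlen_u : (ws.take a).length = a := by
    simp [List.length_take]; omega
  have hlen_v : ((ws.drop a).take m).length = m := by
    simp [List.length_take, List.length_drop]; omega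
  have h1 : (PySem.List.enumerate (ws.take a) t).map
      (fun jw => if t + (a : Int) ≤ jw.1 ∧ jw.1 < t + (a : Int) + (m : Int) then f jw.2 else g jw.2)
      = (ws.take a).map g := by
    have hc : ∀ jw ∈ PySem.List.enumerate (ws.take a) t,
        (if t + (a : Int) ≤ jw.1 ∧ jw.1 < t + (a : Int) + (m : Int) then f jw.2 else g jw.2) = g jw.2 := by
      intro jw hjw
      rw [PySem.List.mem_enumerate_iff] at hjw
      obtain ⟨κ, hκ, rfl⟩ := hjw
      rw [hlen_u] at hκ
      split_ifs with hc
      · exfalso; simp only at hc; omega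
      · rfl
    rw [List.map_congr_left hc]
    conv_rhs => rw [← PySem.List.map_snd_enumerate (ws.take a) t]
    rw [List.map_map]
    rfl
  have h2 : (PySem.List.enumerate ((ws.drop a).take m) (t + (a : Int))).map
      (fun jw => if t + (a : Int) ≤ jw.1 ∧ jw.1 < t + (a : Int) + (m : Int) then f jw.2 else g jw.2)
      = ((ws.drop a).take m).map f := by
    have hc : ∀ jw ∈ PySem.List.enumerate ((ws.drop a).take m) (t + (a : Int)),
        (if t + (a : Int) ≤ jw.1 ∧ jw.1 < t + (a : Int) + (m : Int) then f jw.2 else g jw.2) = f jw.2 := by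
      intro jw hjw
      rw [PySem.List.mem_enumerate_iff] at hjw
      obtain ⟨κ, hκ, rfl⟩ := hjw
      rw [hlen_v] at hκ
      split_ifs with hc
      · rfl
      · exfalso; simp only at hc; omega
    rw [List.map_congr_left hc]
    conv_rhs => rw [← PySem.List.map_snd_enumerate ((ws.drop a).take m) (t + (a : Int))]
    rw [List.map_map]
    rfl
  have h3 : (PySem.List.enumerate (ws.drop (a + m)) (t + (a : Int) + (m : Int))).map
      (fun jw => if t + (a : Int) ≤ jw.1 ∧ jw.1 < t + (a : Int) + (m : Int) then f jw.2 else g jw.2)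
      = (ws.drop (a + m)).map g := by
    have hc : ∀ jw ∈ PySem.List.enumerate (ws.drop (a + m)) (t + (a : Int) + (m : Int)),
        (if t + (a : Int) ≤ jw.1 ∧ jw.1 < t + (a : Int) + (m : Int) then f jw.2 else g jw.2) = g jw.2 := by
      intro jw hjw
      rw [PySem.List.mem_enumerate_iff] at hjw
      obtain ⟨κ, hκ, rfl⟩ := hjw
      split_ifs with hc
      · exfalso; simp only at hc; omega
      · rfl
    rw [List.map_congr_left hc]
    conv_rhs => rw [← PySem.List.map_snd_enumerate (ws.drop (a + m)) (t + (a : Int) + (m : Int))]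
    rw [List.map_map]
    rfl
  conv_lhs => rw [hsplit]
  rw [PySem.List.enumerate_append, PySem.List.enumerate_append, List.map_append, List.map_append,
      hlen_u, hlen_v, h1]
  rw [h2, h3, List.append_assoc]

-- A's window (per-word conditional over the enumeration) as prefix / masked window / suffix.
theorem window_eq (words : List String) (i k : Nat) (hik : i + k ≤ words.length) :
    (PySem.List.enumerate words 0).map
        (fun jw => if (i : Int) ≤ jw.1 ∧ jw.1 < (i : Int) + (k : Int) then pySpaces jw.2 else jw.2)
      = words.take i ++ ((words.drop i).take k).map pySpaces ++ words.drop (i + k) := by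
  have key := mask_enum_splice pySpaces id words i k hik 0
  simp only [List.map_id, zero_add, id_eq] at key
  exact key

-- ---- B-side helpers: the offsets loop and the flat-string splice ----

-- join with a single-space separator, on char lists
def Jc (ls : List (List Char)) : List Char := PySem.Chars.join [' '] ls

-- recursive characterisations of the starts/ends lists built by B's offsets loop
def startsFrom : List String → Int → List Int
  | [], _ => []
  | w :: ws, p => p :: startsFrom ws (p + PySem.Str.len w + 1)

def endsFrom : List String → Int → List Int
  | [], _ => []
  | w :: ws, p => (p + PySem.Str.len w) :: endsFrom ws (p + PySem.Str.len w + 1)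

theorem offs_foldl (ws : List String) : ∀ (st en : List Int) (p : Int),
    ws.foldl
      (fun (acc : List Int × List Int × Int) w =>
        (acc.1 ++ [acc.2.2], acc.2.1 ++ [acc.2.2 + PySem.Str.len w], acc.2.2 + PySem.Str.len w + 1))
      (st, en, p)
    = (st ++ startsFrom ws p, en ++ endsFrom ws p,
       (ws.foldl (fun (acc : List Int × List Int × Int) w =>
        (acc.1 ++ [acc.2.2], acc.2.1 ++ [acc.2.2 + PySem.Str.len w], acc.2.2 + PySem.Str.len w + 1))
        (st, en, p)).2.2) := by
  induction ws with
  | nil => intro st en p; simp [startsFrom, endsFrom]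
  | cons w ws ih =>
    intro st en p
    simp only [List.foldl_cons]
    rw [ih (st ++ [p]) (en ++ [p + PySem.Str.len w]) (p + PySem.Str.len w + 1)]
    simp [startsFrom, endsFrom]

-- the Nat character-offset of word t in the canonical join
def offN : List String → Nat → Nat
  | _, 0 => 0
  | [], _ + 1 => 0
  | w :: ws, t + 1 => w.toList.length + 1 + offN ws t

theorem startsFrom_getD (ws : List String) : ∀ (t : Nat) (p : Int), t < ws.length →
    (startsFrom ws p).getD t 0 = p + (offN ws t : Int) := by
  induction ws with
  | nil => intro t p h; simp at h
  | cons w ws ih =>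
    intro t p h
    cases t with
    | zero => simp [startsFrom, offN]
    | succ t =>
      simp only [startsFrom, List.getD_cons_succ]
      rw [ih t _ (by simpa using h)]
      simp [offN, PySem.Str.len_eq]
      ring

theorem endsFrom_getD (ws : List String) : ∀ (t : Nat) (p : Int), t < ws.length →
    (endsFrom ws p).getD t 0 = p + (offN ws (t + 1) : Int) - 1 := by
  induction ws with
  | nil => intro t p h; simp at h
  | cons w ws ih =>
    intro t p h
    cases t with
    | zero => simp [endsFrom, offN, PySem.Str.len_eq]; ring
    | succ t =>
      simp only [endsFrom, List.getD_cons_succ]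
      rw [ih t _ (by simpa using h)]
      simp [offN, PySem.Str.len_eq]
      ring

-- join of a cons with a nonempty tail
theorem Jc_cons (x : List Char) (xs : List (List Char)) (h : xs ≠ []) :
    Jc (x :: xs) = x ++ ' ' :: Jc xs := by
  cases xs with
  | nil => exact absurd rfl h
  | cons y ys =>
    rw [Jc, PySem.Chars.join_cons_cons]
    simp [Jc]

-- join over an append, both sides nonempty
theorem Jc_append (xs ys : List (List Char)) (hx : xs ≠ []) (hy : ys ≠ []) :
    Jc (xs ++ ys) = Jc xs ++ ' ' :: Jc ys := by
  induction xs with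
  | nil => exact absurd rfl hx
  | cons x xs ih =>
    cases xs with
    | nil =>
      rw [List.singleton_append, Jc_cons x ys hy]
      simp [Jc, PySem.Chars.join_singleton]
    | cons x' xs' =>
      rw [List.cons_append, Jc_cons x _ (by simp), Jc_cons x (x' :: xs') (by simp),
          ih (by simp)]
      simp

-- chars of pySpaces
theorem toList_pySpaces (w : String) : (pySpaces w).toList = List.replicate w.toList.length ' ' := by
  rw [pySpaces, String.toList_ofList, PySem.Str.len_eq]
  simp

-- join of all-space words is a run of spaces of the join's length
theorem Jc_spaces (ls : List (List Char)) :
    Jc (ls.map (fun l => List.replicate l.length ' ')) = List.replicate (Jc ls).length ' ' := by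
  induction ls with
  | nil => simp [Jc, PySem.Chars.join_nil]
  | cons x xs ih =>
    cases xs with
    | nil => simp [Jc, PySem.Chars.join_singleton]
    | cons y ys =>
      rw [List.map_cons, Jc_cons _ _ (by simp), ih, Jc_cons x (y :: ys) (by simp)]
      simp only [List.length_append, List.length_cons]
      rw [show x.length + (Jc (y :: ys)).length.succ = x.length + (1 + (Jc (y :: ys)).length) by omega,
          List.replicate_add, List.replicate_add, List.replicate_one]
      simp

-- offN versus the join length of the first t words
theorem offN_eq (ws : List String) : ∀ t, 0 < t → t ≤ ws.length →
    offN ws t = (Jc ((ws.take t).map String.toList)).length + 1 := by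
  induction ws with
  | nil => intro t h1 h2; simp at h2; omega
  | cons w ws ih =>
    intro t h1 h2
    cases t with
    | zero => omega
    | succ t =>
      cases Nat.eq_zero_or_pos t with
      | inl h0 =>
        subst h0
        simp [offN, Jc, PySem.Chars.join_singleton]
      | inr hpos =>
        have hws : ws ≠ [] := by intro h; subst h; simp at h2; omega
        have hne : (ws.take t).map String.toList ≠ [] := by
          simp [List.take_eq_nil_iff, hws]
          omega
        rw [List.take_succ_cons, List.map_cons]
        rw [Jc_cons _ _ hne]
        rw [offN, ih t hpos (by simp at h2; omega)]
        simp [Jc]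
        omega

-- the central identity: overwriting the span [a, b) of the canonical join with spaces
-- equals joining with the window words replaced by space words
theorem splice_eq (pre mid suf : List (List Char)) (hm : mid ≠ []) :
    (Jc (pre ++ mid ++ suf)).take (if pre = [] then 0 else (Jc pre).length + 1)
      ++ List.replicate (Jc mid).length ' '
      ++ (Jc (pre ++ mid ++ suf)).drop ((if pre = [] then 0 else (Jc pre).length + 1) + (Jc mid).length)
    = Jc (pre ++ mid.map (fun l => List.replicate l.length ' ') ++ suf) := by
  have hsp : mid.map (fun l => List.replicate l.length ' ') ≠ [] := by
    simpa [List.map_eq_nil_iff] using hm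
  by_cases hp : pre = []
  · subst hp
    by_cases hs : suf = []
    · subst hs
      simp only [List.nil_append, List.append_nil, Jc_spaces mid]
      simp
    · rw [if_pos rfl]
      simp only [List.nil_append, List.take_zero, Nat.zero_add]
      rw [Jc_append mid suf hm hs, Jc_append _ suf hsp hs, Jc_spaces mid]
      have : (Jc mid ++ ' ' :: Jc suf).drop (Jc mid).length = ' ' :: Jc suf := by
        simp [List.drop_left]
      rw [this]
  · rw [if_neg hp]
    by_cases hs : suf = []
    · subst hs
      simp only [List.append_nil]
      rw [Jc_append pre mid hp hm, Jc_append pre _ hp hsp, Jc_spaces mid]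
      have htake : (Jc pre ++ ' ' :: Jc mid).take ((Jc pre).length + 1) = Jc pre ++ [' '] := by
        rw [List.take_append]
        simp [List.take_succ_cons]
      have hdrop : (Jc pre ++ ' ' :: Jc mid).drop ((Jc pre).length + 1 + (Jc mid).length) = [] := by
        apply List.drop_eq_nil_of_le
        simp
        omega
      rw [htake, hdrop]
      simp
    · have h1 : Jc (pre ++ mid ++ suf) = Jc pre ++ ' ' :: (Jc mid ++ ' ' :: Jc suf) := by
        rw [List.append_assoc, Jc_append pre (mid ++ suf) hp (by simp [hm]),
            Jc_append mid suf hm hs]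
      have h2 : Jc (pre ++ mid.map (fun l => List.replicate l.length ' ') ++ suf)
          = Jc pre ++ ' ' :: (List.replicate (Jc mid).length ' ' ++ ' ' :: Jc suf) := by
        rw [List.append_assoc, Jc_append pre _ hp (by simp [hsp]),
            Jc_append _ suf hsp hs, Jc_spaces mid]
      rw [h1, h2]
      have htake : (Jc pre ++ ' ' :: (Jc mid ++ ' ' :: Jc suf)).take ((Jc pre).length + 1)
          = Jc pre ++ [' '] := by
        rw [List.take_append]
        simp [List.take_succ_cons]
      have hdrop : (Jc pre ++ ' ' :: (Jc mid ++ ' ' :: Jc suf)).drop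
          ((Jc pre).length + 1 + (Jc mid).length) = ' ' :: Jc suf := by
        have hassoc : Jc pre ++ ' ' :: (Jc mid ++ ' ' :: Jc suf)
            = (Jc pre ++ ' ' :: Jc mid) ++ (' ' :: Jc suf) := by simp
        have hlen : (Jc pre).length + 1 + (Jc mid).length
            = (Jc pre ++ ' ' :: Jc mid).length := by simp; omega
        rw [hassoc, hlen]
        exact List.drop_left
      rw [htake, hdrop]
      simp

-- ---- the per-window equality: B's span overwrite = A's conditional join ----

theorem offN_zero (ws : List String) : offN ws 0 = 0 := by cases ws <;> rfl

theorem per_window (ws : List String) (i k : Int) (hi : 0 ≤ i) (hk : 1 ≤ k)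
    (hik : i + k ≤ (ws.length : Int)) :
    String.ofList ((PySem.Str.slice (PySem.Str.join " " ws) none
        (some (PySem.List.pyGetD (startsFrom ws 0) i 0))).toList
      ++ List.replicate ((PySem.List.pyGetD (endsFrom ws 0) (i + k - 1) 0)
          - (PySem.List.pyGetD (startsFrom ws 0) i 0)).toNat ' '
      ++ (PySem.Str.slice (PySem.Str.join " " ws)
          (some (PySem.List.pyGetD (endsFrom ws 0) (i + k - 1) 0)) none).toList)
    = PySem.Str.join " " ((PySem.List.enumerate ws 0).map
        (fun jw => if i ≤ jw.1 ∧ jw.1 < i + k then pySpaces jw.2 else jw.2)) := by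
  have hslice : ∀ (l : List Char) a b, PySem.Chars.slice l a b = PySem.List.slice l a b :=
    fun _ _ _ => rfl
  obtain ⟨i', rfl⟩ : ∃ n : Nat, i = (n : Int) := ⟨i.toNat, (Int.toNat_of_nonneg hi).symm⟩
  obtain ⟨k', rfl⟩ : ∃ n : Nat, k = (n : Int) := ⟨k.toNat, (Int.toNat_of_nonneg (by omega)).symm⟩
  have hlen : i' + k' ≤ ws.length := by omega
  have hidx1 : i' < ws.length := by omega
  have hwsne : ws ≠ [] := by intro h; subst h; simp at hidx1
  -- the two offset lookups
  have ha : PySem.List.pyGetD (startsFrom ws 0) (i' : Int) 0 = (offN ws i' : Int) := by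
    rw [PySem.List.pyGetD_natCast, startsFrom_getD ws i' 0 hidx1]
    simp
  have hb : PySem.List.pyGetD (endsFrom ws 0) ((i' : Int) + (k' : Int) - 1) 0
      = (offN ws (i' + k') : Int) - 1 := by
    have he : (i' : Int) + (k' : Int) - 1 = ((i' + k' - 1 : Nat) : Int) := by omega
    rw [he, PySem.List.pyGetD_natCast, endsFrom_getD ws _ 0 (by omega)]
    have h2 : i' + k' - 1 + 1 = i' + k' := by omega
    rw [h2]
    simp
  -- the three word groups
  set pre := (ws.take i').map String.toList with hpre
  set mid := ((ws.drop i').take k').map String.toList with hmid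
  set suf := (ws.drop (i' + k')).map String.toList with hsuf
  have hm : mid ≠ [] := by
    rw [hmid]
    simp [List.take_eq_nil_iff, List.drop_eq_nil_iff]
    omega
  have hws : ws = ws.take i' ++ ((ws.drop i').take k' ++ ws.drop (i' + k')) := by
    rw [← List.drop_drop, List.take_append_drop, List.take_append_drop]
  have hall : ws.map String.toList = pre ++ mid ++ suf := by
    conv_lhs => rw [hws]
    simp only [List.map_append, hpre, hmid, hsuf, List.append_assoc]
  -- offsets versus join lengths
  have haN : offN ws i' = (if pre = [] then 0 else (Jc pre).length + 1) := by
    by_cases h0 : i' = 0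
    · rw [h0]
      have hp0 : pre = [] := by simp [hpre, h0]
      rw [if_pos hp0, offN_zero]
    · have hpne : pre ≠ [] := by
        simp [hpre, List.take_eq_nil_iff, hwsne]
        omega
      rw [if_neg hpne, offN_eq ws i' (by omega) (by omega)]
  have hpm : (ws.take (i' + k')).map String.toList = pre ++ mid := by
    rw [hpre, hmid, ← List.map_append, List.take_add]
  have hbN : offN ws (i' + k')
      = (if pre = [] then 0 else (Jc pre).length + 1) + (Jc mid).length + 1 := by
    rw [offN_eq ws (i' + k') (by omega) (by omega), hpm]
    by_cases h0 : pre = []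
    · rw [if_pos h0, h0, List.nil_append]
      omega
    · rw [if_neg h0, Jc_append pre mid h0 hm]
      simp
      omega
  -- chars of the canonical string
  have hcs : (PySem.Str.join " " ws).toList = Jc (ws.map String.toList) := by
    rw [PySem.Str.toList_join]
    rfl
  -- reduce both slices to take/drop on the char list
  rw [PySem.Str.toList_slice, PySem.Str.toList_slice, hslice, hslice, ha, hb,
      PySem.List.slice_to _ (by positivity), PySem.List.slice_from _ (by omega)]
  have hta : ((offN ws i' : Int)).toNat = offN ws i' := by omega
  have htb : ((offN ws (i' + k') : Int) - 1).toNat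
      = (if pre = [] then 0 else (Jc pre).length + 1) + (Jc mid).length := by omega
  have htr : ((offN ws (i' + k') : Int) - 1 - (offN ws i' : Int)).toNat
      = (Jc mid).length := by omega
  rw [hta, htb, htr, hcs, hall]
  -- A's side: the conditional pass is the three-part splice, then push toList through the join
  rw [window_eq ws i' k' hlen]
  have hrhs : (PySem.Str.join " " (ws.take i'
        ++ ((ws.drop i').take k').map pySpaces ++ ws.drop (i' + k'))).toList
      = Jc (pre ++ mid.map (fun l => List.replicate l.length ' ') ++ suf) := by
    rw [PySem.Str.toList_join]
    show Jc _ = _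
    congr 1
    rw [List.map_append, List.map_append, List.map_map, hpre, hsuf, hmid, List.map_map]
    congr 1
    congr 1
    apply List.map_congr_left
    intro w _
    simp [Function.comp, toList_pySpaces]
  conv_rhs => rw [← String.ofList_toList (s := PySem.Str.join " " _)]
  rw [hrhs, haN]
  exact congrArg String.ofList (splice_eq pre mid suf hm)

-- ===== VERDICT (by name: the statement is the Claim_ definition above) =====
theorem mask_text_spec : Claim_equal_mask_text := by
  intro text kernel_size stride _ hpre
  unfold Pre_mask_text at hpre
  cases kernel_size with
  | none => exact absurd hpre.1 (by simp)
  | some k =>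
    cases stride with
    | none => exact absurd hpre.2.1 (by simp)
    | some s =>
      simp only [Option.getD_some] at hpre
      obtain ⟨-, -, hpre⟩ := hpre
      unfold Spec_mask_text mask_text mask_text_alt
      dsimp only
      rw [offs_foldl (PySem.Str.split₀ text) [] [] 0]
      dsimp only
      simp only [List.nil_append]
      rcases hpre with ⟨hk, hs⟩ | ⟨hs, hk⟩
      · apply PySem.List.foldl_congr_mem
        intro acc i hi
        rw [PySem.List.mem_pyRange_iff_of_pos (by omega) i] at hi
        obtain ⟨h0, hlt, -⟩ := hi
        have hik : i + k ≤ (((PySem.Str.split₀ text).length : Int)) := by omega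
        rw [per_window (PySem.Str.split₀ text) i k h0 hk hik]
      · -- negative stride with an empty range: both loops run zero times
        have hempty : PySem.List.pyRange 0 (((PySem.Str.split₀ text).length : Int) - k + 1) s = [] := by
          simp [PySem.List.pyRange]
          intro h1
          rw [if_neg (by omega), if_neg (by omega)]
        rw [hempty]
        rfl
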